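-- pv_equiv track=rewrite | github.com/diegogerwig/advent_of_code | 2024/12/advent_2024_12.py | find_segments_in_row
-- ===== SOURCE A (Python) =====
-- def find_segments_in_row(region, row):
--     """
--     Finds continuous segments in a row directly from region coordinates
--     Returns list of tuples (start, end) for each continuous segment
--     """
--     # Get all columns in this row
--     cols = sorted([col for r, col in region if r == row])
--     if not cols:
--         return []
--
--     segments = []
--     start = cols[0]
--     prev = start
--
--     for col in cols[1:]:
--         if col > prev + 1:  # Gap found
--             segments.append((start, prev))
--             start = col
--         prev = col
--     segments.append((start, prev))
--
--     return segments
-- ===== SOURCE B (Python) =====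
-- def find_segments_in_row(region, row):
--     """
--     Finds continuous segments in a row directly from region coordinates
--     Returns list of tuples (start, end) for each continuous segment
--     """
--     cols = {col for r, col in region if r == row}
--     starts = sorted(c for c in cols if c - 1 not in cols)
--     ends = sorted(c for c in cols if c + 1 not in cols)
--     return list(zip(starts, ends))
-- ===== Notes on version B (the rewrite author's own statement) =====
-- stated objective: alternative
-- what changed: Replaces the sort + linear gap-scan with stateful start/prev tracking by set-membership boundary detection: a column starts a segment iff c-1 is absent and ends one iff c+1 is absent; the two sorted boundary lists are zipped.
import Mathlib
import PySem

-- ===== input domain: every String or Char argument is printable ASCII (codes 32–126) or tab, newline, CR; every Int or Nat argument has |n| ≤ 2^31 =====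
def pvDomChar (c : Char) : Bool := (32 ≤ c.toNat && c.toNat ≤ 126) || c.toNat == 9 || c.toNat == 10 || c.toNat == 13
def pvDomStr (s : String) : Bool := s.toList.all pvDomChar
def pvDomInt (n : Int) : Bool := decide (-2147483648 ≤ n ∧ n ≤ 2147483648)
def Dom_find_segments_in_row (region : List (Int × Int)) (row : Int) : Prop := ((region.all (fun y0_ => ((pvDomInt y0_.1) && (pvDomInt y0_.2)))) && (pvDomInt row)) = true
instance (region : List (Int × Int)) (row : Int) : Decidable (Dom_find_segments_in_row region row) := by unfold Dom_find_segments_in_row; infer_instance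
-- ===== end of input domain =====

-- B replaces A's sort + gap-scan by set-membership boundary detection (start iff c-1 absent, end iff c+1 absent), zipping the sorted boundary lists; alternative algorithm, same cost.


-- ===== PORT A =====
-- the for-loop over cols[1:] with state (segments, start, prev); segments are emitted in order
def goSeg (start prev : Int) : List Int → List (Int × Int)
  | [] => [(start, prev)]
  | c :: cs => if c > prev + 1 then (start, prev) :: goSeg c c cs else goSeg start c cs

def find_segments_in_row (region : List (Int × Int)) (row : Int) : List (Int × Int) :=
  let cols := PySem.List.sorted ((region.filter (fun rc => rc.1 == row)).map (fun rc => rc.2)) (fun x => x) false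
  match cols with
  | [] => []
  | d :: rest => goSeg d d rest

-- ===== PORT B =====
def find_segments_in_row_alt (region : List (Int × Int)) (row : Int) : List (Int × Int) :=
  let cols : PySem.Set Int := PySem.Set.ofList ((region.filter (fun rc => rc.1 == row)).map (fun rc => rc.2))
  let starts := PySem.List.sorted (cols.filter (fun c => !(PySem.Set.contains cols (c - 1)))) (fun x => x) false
  let ends := PySem.List.sorted (cols.filter (fun c => !(PySem.Set.contains cols (c + 1)))) (fun x => x) false
  starts.zip ends

-- ===== PRECONDITION & SPEC =====
def Spec_find_segments_in_row (region : List (Int × Int)) (row : Int) (out : List (Int × Int)) : Prop := out = find_segments_in_row_alt region row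
instance (region : List (Int × Int)) (row : Int) (out : List (Int × Int)) : Decidable (Spec_find_segments_in_row region row out) := by unfold Spec_find_segments_in_row; infer_instance

-- ===== CLAIM (what is proved, stated in full; the proofs are below) =====
def Claim_equal_find_segments_in_row : Prop := ∀ (region : List (Int × Int)) (row : Int), Dom_find_segments_in_row region row → Spec_find_segments_in_row region row (find_segments_in_row region row)

-- ===== LEMMAS AND PROOFS =====

-- drop elements equal to the previous value (collapses duplicates of a sorted list)
def ddAdj (p : Int) : List Int → List Int
  | [] => []
  | y :: ys => if y = p then ddAdj p ys else y :: ddAdj y ys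

-- segment starts strictly after p in a strictly sorted list
def startsIn (p : Int) : List Int → List Int
  | [] => []
  | y :: ys => if y = p + 1 then startsIn y ys else y :: startsIn y ys

-- segment ends of p :: (strictly sorted list)
def endsIn (p : Int) : List Int → List Int
  | [] => [p]
  | y :: ys => if y = p + 1 then endsIn y ys else p :: endsIn y ys

theorem goSeg_ddAdj (xs : List Int) : ∀ s p, xs.Pairwise (· ≤ ·) → (∀ x ∈ xs, p ≤ x) →
    goSeg s p xs = goSeg s p (ddAdj p xs) := by
  induction xs with
  | nil => intro s p _ _; rfl
  | cons y ys ih =>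
    intro s p hs hb
    rw [List.pairwise_cons] at hs
    by_cases hy : y = p
    · subst hy
      simp only [ddAdj, goSeg]
      rw [if_neg (by omega : ¬ y > y + 1)]
      exact ih s y hs.2 (fun x hx => hs.1 x hx)
    · have hpy : p < y := lt_of_le_of_ne (hb y (by simp)) (Ne.symm hy)
      simp only [ddAdj, if_neg hy, goSeg]
      by_cases hgap : y > p + 1
      · simp only [if_pos hgap]
        rw [ih y y hs.2 hs.1]
      · simp only [if_neg hgap]
        rw [ih s y hs.2 hs.1]

theorem ddAdj_mem (xs : List Int) : ∀ p, xs.Pairwise (· ≤ ·) → (∀ x ∈ xs, p ≤ x) →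
    ∀ x, x ∈ ddAdj p xs ↔ (x ∈ xs ∧ x ≠ p) := by
  induction xs with
  | nil => intro p _ _ x; simp [ddAdj]
  | cons y ys ih =>
    intro p hs hb x
    rw [List.pairwise_cons] at hs
    by_cases hy : y = p
    · subst hy
      rw [ddAdj, if_pos rfl, ih y hs.2 hs.1]
      constructor
      · rintro ⟨h1, h2⟩; exact ⟨List.mem_cons_of_mem _ h1, h2⟩
      · rintro ⟨h1, h2⟩
        rcases List.mem_cons.mp h1 with h | h
        · exact absurd h h2
        · exact ⟨h, h2⟩
    · have hpy : p < y := lt_of_le_of_ne (hb y (by simp)) (Ne.symm hy)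
      rw [ddAdj, if_neg hy]
      rw [List.mem_cons, ih y hs.2 hs.1]
      constructor
      · rintro (h | ⟨h1, h2⟩)
        · exact ⟨by simp [h], by omega⟩
        · have := hs.1 x h1
          exact ⟨List.mem_cons_of_mem _ h1, by omega⟩
      · rintro ⟨h1, h2⟩
        rcases List.mem_cons.mp h1 with h | h
        · exact Or.inl h
        · by_cases hxy : x = y
          · exact Or.inl hxy
          · exact Or.inr ⟨h, hxy⟩

theorem ddAdj_sorted (xs : List Int) : ∀ p, xs.Pairwise (· ≤ ·) → (∀ x ∈ xs, p ≤ x) →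
    (ddAdj p xs).Pairwise (· < ·) ∧ (∀ x ∈ ddAdj p xs, p < x) := by
  induction xs with
  | nil => intro p _ _; simp [ddAdj]
  | cons y ys ih =>
    intro p hs hb
    rw [List.pairwise_cons] at hs
    by_cases hy : y = p
    · subst hy
      rw [ddAdj, if_pos rfl]
      exact ih y hs.2 hs.1
    · have hpy : p < y := lt_of_le_of_ne (hb y (by simp)) (Ne.symm hy)
      rw [ddAdj, if_neg hy]
      obtain ⟨h1, h2⟩ := ih y hs.2 hs.1
      refine ⟨List.pairwise_cons.mpr ⟨h2, h1⟩, ?_⟩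
      intro x hx
      rcases List.mem_cons.mp hx with h | h
      · omega
      · have := h2 x h; omega

theorem goSeg_zip (xs : List Int) : ∀ s p, (p :: xs).Pairwise (· < ·) →
    goSeg s p xs = (s :: startsIn p xs).zip (endsIn p xs) := by
  induction xs with
  | nil => intro s p _; simp [goSeg, startsIn, endsIn]
  | cons y ys ih =>
    intro s p h
    rw [List.pairwise_cons] at h
    have hpy : p < y := h.1 y (by simp)
    by_cases hy : y = p + 1
    · rw [goSeg, if_neg (by omega), startsIn, if_pos hy, endsIn, if_pos hy]
      exact ih s y h.2
    · have hgap : y > p + 1 := by omega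
      rw [goSeg, if_pos hgap, startsIn, if_neg hy, endsIn, if_neg hy]
      rw [ih y y h.2]
      simp [List.zip]

theorem startsIn_filter (xs : List Int) : ∀ (p : Int) (P : Int → Bool),
    (∀ c ∈ xs, P c = decide ((c - 1) ∈ (p :: xs))) → (p :: xs).Pairwise (· < ·) →
    xs.filter (fun c => !P c) = startsIn p xs := by
  induction xs with
  | nil => intro p P _ _; rfl
  | cons y ys ih =>
    intro p P hP h
    rw [List.pairwise_cons] at h
    have h' := List.pairwise_cons.mp h.2
    have hpy : p < y := h.1 y (by simp)
    have hys : ∀ z ∈ ys, y < z := h'.1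
    have hPy : P y = decide (y = p + 1) := by
      rw [hP y (by simp)]
      rw [decide_eq_decide]
      simp only [List.mem_cons]
      constructor
      · rintro (h1 | h1 | h1)
        · omega
        · omega
        · have := hys _ h1; omega
      · intro h1; left; omega
    have hP' : ∀ c ∈ ys, P c = decide ((c - 1) ∈ (y :: ys)) := by
      intro c hc
      rw [hP c (by simp [hc]), decide_eq_decide]
      have hyc := hys c hc
      simp only [List.mem_cons]
      constructor
      · rintro (h1 | h1); · omega
        · exact h1
      · intro h1; right; exact h1
    by_cases hy : y = p + 1
    · rw [List.filter_cons_of_neg (by rw [hPy]; simp [hy]), startsIn, if_pos hy]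
      exact ih y P hP' h.2
    · rw [List.filter_cons_of_pos (by rw [hPy]; simp [hy]), startsIn, if_neg hy]
      rw [ih y P hP' h.2]

theorem endsIn_filter (xs : List Int) : ∀ (p : Int) (P : Int → Bool),
    (∀ c ∈ p :: xs, P c = decide ((c + 1) ∈ (p :: xs))) → (p :: xs).Pairwise (· < ·) →
    (p :: xs).filter (fun c => !P c) = endsIn p xs := by
  induction xs with
  | nil =>
    intro p P hP _
    have : P p = false := by
      rw [hP p (by simp)]
      simp only [List.mem_cons, List.not_mem_nil, or_false, decide_eq_false_iff_not]
      omega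
    simp [List.filter, this, endsIn]
  | cons y ys ih =>
    intro p P hP h
    rw [List.pairwise_cons] at h
    have h' := List.pairwise_cons.mp h.2
    have hpy : p < y := h.1 y (by simp)
    have hys : ∀ z ∈ ys, y < z := h'.1
    have hPp : P p = decide (y = p + 1) := by
      rw [hP p (by simp), decide_eq_decide]
      simp only [List.mem_cons]
      constructor
      · rintro (h1 | h1 | h1)
        · omega
        · omega
        · have := hys _ h1; omega
      · intro h1; right; left; omega
    have hP' : ∀ c ∈ y :: ys, P c = decide ((c + 1) ∈ (y :: ys)) := by
      intro c hc
      have hyc : y ≤ c := by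
        rcases List.mem_cons.mp hc with h1 | h1
        · omega
        · have := hys c h1; omega
      rw [hP c (by simp [List.mem_cons.mp hc]), decide_eq_decide]
      simp only [List.mem_cons]
      constructor
      · rintro (h1 | h1); · omega
        · exact h1
      · intro h1; right; exact h1
    by_cases hy : y = p + 1
    · rw [List.filter_cons_of_neg (by rw [hPp]; simp [hy]), endsIn, if_pos hy]
      exact ih y P hP' h.2
    · rw [List.filter_cons_of_pos (by rw [hPp]; simp [hy]), endsIn, if_neg hy]
      rw [ih y P hP' h.2]

-- ===== VERDICT (by name: the statement is the Claim_ definition above) =====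
theorem find_segments_in_row_spec : Claim_equal_find_segments_in_row := by
  intro region row _
  unfold Spec_find_segments_in_row find_segments_in_row find_segments_in_row_alt
  dsimp only
  set raw := (region.filter (fun rc => rc.1 == row)).map (fun rc => rc.2) with hraw
  set S : PySem.Set Int := PySem.Set.ofList raw with hSdef
  rcases h : PySem.List.sorted raw (fun x => x) false with _ | ⟨d, t⟩
  · have hraw0 : raw = [] := (PySem.List.sorted_eq_nil_iff raw (fun x => x) false).mp h
    simp [hraw0, hSdef, PySem.List.sorted_eq_nil_iff]
  · have hps := PySem.List.sorted_pairwise raw (fun x => x)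
    rw [h] at hps
    rw [List.pairwise_cons] at hps
    have ht : t.Pairwise (· ≤ ·) := hps.2
    have hb : ∀ x ∈ t, d ≤ x := hps.1
    have hmemL : ∀ x : Int, x ∈ (d :: t) ↔ x ∈ raw := by
      intro x; rw [← h]; exact PySem.List.mem_sorted raw (fun x => x) false x
    have hmemdd := ddAdj_mem t d ht hb
    have hdd := ddAdj_sorted t d ht hb
    have hDlt : (d :: ddAdj d t).Pairwise (· < ·) := List.pairwise_cons.mpr ⟨hdd.2, hdd.1⟩
    have memDL : ∀ x : Int, x ∈ (d :: ddAdj d t) ↔ x ∈ raw := by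
      intro x
      rw [← hmemL x]
      simp only [List.mem_cons, hmemdd x]
      constructor
      · rintro (h1 | ⟨h1, _⟩)
        · exact Or.inl h1
        · exact Or.inr h1
      · rintro (h1 | h1)
        · exact Or.inl h1
        · by_cases hxd : x = d
          · exact Or.inl hxd
          · exact Or.inr ⟨h1, hxd⟩
    have hS : ∀ z : Int, PySem.Set.contains S z = decide (z ∈ (d :: ddAdj d t)) := by
      intro z
      have h1 : PySem.Set.contains S z = true ↔ z ∈ (d :: ddAdj d t) := by
        rw [PySem.Set.contains_iff]
        show z ∈ PySem.Set.ofList raw ↔ _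
        rw [PySem.Set.mem_ofList, memDL z]
      by_cases hz : z ∈ (d :: ddAdj d t)
      · simp only [hz, decide_true]; exact h1.mpr hz
      · simp only [hz, decide_false]
        exact Bool.eq_false_iff.mpr (fun hc => hz (h1.mp hc))
    have hnodD : (d :: ddAdj d t).Nodup := hDlt.imp (fun h => ne_of_lt h)
    have hpermDS : (d :: ddAdj d t).Perm S := by
      refine (List.perm_ext_iff_of_nodup hnodD (PySem.Set.nodup_ofList raw)).mpr ?_
      intro x
      show _ ↔ x ∈ PySem.Set.ofList raw
      rw [PySem.Set.mem_ofList]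
      exact memDL x
    have hstart : PySem.List.sorted (S.filter (fun c => !(PySem.Set.contains S (c - 1)))) (fun x => x) false
        = (d :: ddAdj d t).filter (fun c => !(PySem.Set.contains S (c - 1))) := by
      exact PySem.List.sorted_eq_of_perm_of_pairwise_lt _ _ _ ((List.Perm.filter _ hpermDS)) (hDlt.filter _)
    have hend : PySem.List.sorted (S.filter (fun c => !(PySem.Set.contains S (c + 1)))) (fun x => x) false
        = (d :: ddAdj d t).filter (fun c => !(PySem.Set.contains S (c + 1))) := by
      exact PySem.List.sorted_eq_of_perm_of_pairwise_lt _ _ _ ((List.Perm.filter _ hpermDS)) (hDlt.filter _)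
    have hstart2 : (d :: ddAdj d t).filter (fun c => !(PySem.Set.contains S (c - 1)))
        = d :: startsIn d (ddAdj d t) := by
      rw [List.filter_cons_of_pos]
      · rw [startsIn_filter (ddAdj d t) d (fun c => PySem.Set.contains S (c - 1)) (fun c _ => hS (c - 1)) hDlt]
      · rw [hS (d - 1)]
        have : ¬ (d - 1) ∈ (d :: ddAdj d t) := by
          simp only [List.mem_cons]
          rintro (h1 | h1)
          · omega
          · have := hdd.2 _ h1; omega
        simp [this]
    have hend2 : (d :: ddAdj d t).filter (fun c => !(PySem.Set.contains S (c + 1)))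
        = endsIn d (ddAdj d t) :=
      endsIn_filter (ddAdj d t) d (fun c => PySem.Set.contains S (c + 1)) (fun c _ => hS (c + 1)) hDlt
    rw [hstart, hend, hstart2, hend2]
    show goSeg d d t = (d :: startsIn d (ddAdj d t)).zip (endsIn d (ddAdj d t))
    rw [goSeg_ddAdj t d d ht hb]
    exact goSeg_zip (ddAdj d t) d d hDlt
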